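-- pv_equiv track=rewrite | github.com/dragancajic/proceduralno-programiranje | vjezbe-06/zadatak-4.py | dopuni_cifre
-- ===== SOURCE A (Python) =====
-- def dopuni_cifre(n):
--     cifre_broja = []
--
--     if n == 0:
--         cifre_broja = [0]
--
--     while n > 0:
--         c = n % 10
--         n //= 10
--         cifre_broja.insert(0, c)
--     # imamo sve cifre broja, sada kreiramo dopunjene cifre do 9
--     cifre_broja = [9-c for c in cifre_broja]
--
--     novi_broj = 0
--     for c in cifre_broja:
--         novi_broj *= 10
--         novi_broj += c
--     return novi_broj
-- ===== SOURCE B (Python) =====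
-- def dopuni_cifre(n):
--     if n == 0:
--         return 9
--     if n < 0:
--         return 0
--     d = 0
--     m = n
--     while m > 0:
--         d += 1
--         m //= 10
--     return 10 ** d - 1 - n
-- ===== Notes on version B (the rewrite author's own statement) =====
-- stated objective: simpler
-- what changed: B replaces A's three passes (extract digits into a list, complement each digit, re-fold the list into a number) with the closed form all-nines-minus-n after a single digit-count loop, handling the zero and negative cases up front exactly as A's empty-loop behaviour yields them.
import Mathlib
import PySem

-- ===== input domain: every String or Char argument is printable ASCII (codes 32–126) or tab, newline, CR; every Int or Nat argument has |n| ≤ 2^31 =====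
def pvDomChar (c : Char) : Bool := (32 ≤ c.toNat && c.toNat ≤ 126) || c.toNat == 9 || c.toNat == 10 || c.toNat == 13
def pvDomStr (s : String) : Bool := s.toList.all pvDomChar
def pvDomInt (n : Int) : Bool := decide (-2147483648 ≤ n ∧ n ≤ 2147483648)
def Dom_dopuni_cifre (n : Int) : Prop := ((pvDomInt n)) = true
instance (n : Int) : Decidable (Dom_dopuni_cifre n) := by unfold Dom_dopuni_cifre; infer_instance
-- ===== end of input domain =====

-- B computes the 9's complement by the closed form 10^d - 1 - n (d = digit count) instead of
-- A's extract-digits / complement / reassemble passes; same value everywhere, no list built.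

-- ===== PORT A =====
-- termination helper for the while loop: n //= 10 strictly shrinks n.toNat while n > 0
theorem pvFloordiv10_toNat_lt (n : Int) (h : 0 < n) :
    (PySem.Int.floordiv n 10).toNat < n.toNat := by
  rw [PySem.Int.floordiv_eq_ediv_of_pos (by norm_num)]
  omega

-- the while loop: digits inserted at index 0 (most-significant digit ends up first)
def pvALoop (n : Int) (acc : List Int) : List Int :=
  if h : 0 < n then
    pvALoop (PySem.Int.floordiv n 10) (PySem.Int.mod n 10 :: acc)
  else acc
termination_by n.toNat
decreasing_by exact pvFloordiv10_toNat_lt n h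

def dopuni_cifre (n : Int) : Int :=
  let cifre_broja : List Int := if n = 0 then [0] else []
  let cifre_broja := pvALoop n cifre_broja
  let cifre_broja := cifre_broja.map (fun c => 9 - c)
  cifre_broja.foldl (fun novi_broj c => novi_broj * 10 + c) 0

-- ===== PORT B =====
-- Source B's digit-count while loop (d stays ≥ 0; 10 ** d is ported via .toNat exponent)
def pvNdLoop (m : Int) (d : Int) : Int :=
  if _h : 0 < m then pvNdLoop (PySem.Int.floordiv m 10) (d + 1) else d
termination_by m.toNat
decreasing_by exact pvFloordiv10_toNat_lt m _h

def dopuni_cifre_alt (n : Int) : Int :=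
  if n = 0 then 9
  else if n < 0 then 0
  else (10 : Int) ^ (pvNdLoop n 0).toNat - 1 - n

-- ===== PRECONDITION & SPEC =====
def Spec_dopuni_cifre (n : Int) (out : Int) : Prop := out = dopuni_cifre_alt n
instance (n : Int) (out : Int) : Decidable (Spec_dopuni_cifre n out) := by unfold Spec_dopuni_cifre; infer_instance

-- ===== CLAIM (what is proved, stated in full; the proofs are below) =====
def Claim_equal_dopuni_cifre : Prop := ∀ (n : Int), Dom_dopuni_cifre n → Spec_dopuni_cifre n (dopuni_cifre n)

-- ===== LEMMAS AND PROOFS =====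

theorem pvALoop_append (n : Int) (acc : List Int) :
    pvALoop n acc = pvALoop n [] ++ acc := by
  by_cases h : 0 < n
  · conv_lhs => rw [pvALoop]
    conv_rhs => rw [pvALoop]
    simp only [h, dif_pos]
    rw [pvALoop_append (PySem.Int.floordiv n 10) (PySem.Int.mod n 10 :: acc),
        pvALoop_append (PySem.Int.floordiv n 10) [PySem.Int.mod n 10]]
    simp
  · conv_lhs => rw [pvALoop]
    conv_rhs => rw [pvALoop]
    simp [h]
termination_by n.toNat
decreasing_by all_goals exact pvFloordiv10_toNat_lt n h

theorem pvNdLoop_shift (m : Int) (d : Int) :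
    pvNdLoop m d = pvNdLoop m 0 + d := by
  by_cases h : 0 < m
  · conv_lhs => rw [pvNdLoop]
    conv_rhs => rw [pvNdLoop]
    simp only [h, dif_pos]
    rw [pvNdLoop_shift (PySem.Int.floordiv m 10) (d + 1),
        pvNdLoop_shift (PySem.Int.floordiv m 10) (0 + 1)]
    ring
  · conv_lhs => rw [pvNdLoop]
    conv_rhs => rw [pvNdLoop]
    simp [h]
termination_by m.toNat
decreasing_by all_goals exact pvFloordiv10_toNat_lt m h

theorem pvNdLoop_nonneg (m : Int) (d : Int) (hd : 0 ≤ d) : 0 ≤ pvNdLoop m d := by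
  by_cases h : 0 < m
  · conv_rhs => rw [pvNdLoop]
    simp only [h, dif_pos]
    exact pvNdLoop_nonneg (PySem.Int.floordiv m 10) (d + 1) (by omega)
  · conv_rhs => rw [pvNdLoop]
    simp [h]; omega
termination_by m.toNat
decreasing_by all_goals exact pvFloordiv10_toNat_lt m h

-- the core identity: for n > 0 the fold of the complemented digit list is 10^d - 1 - n
theorem pvMain (n : Int) (hn : 0 < n) :
    ((pvALoop n []).map (fun c => 9 - c)).foldl (fun a c => a * 10 + c) 0
      = (10 : Int) ^ (pvNdLoop n 0).toNat - 1 - n := by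
  have hfd : PySem.Int.floordiv n 10 = n / 10 :=
    PySem.Int.floordiv_eq_ediv_of_pos (by norm_num)
  have hmd : PySem.Int.mod n 10 = n % 10 :=
    PySem.Int.mod_eq_emod_of_pos (by norm_num)
  have hA : pvALoop n [] = pvALoop (PySem.Int.floordiv n 10) [] ++ [PySem.Int.mod n 10] := by
    conv_lhs => rw [pvALoop]
    simp only [hn, dif_pos]
    exact pvALoop_append _ _
  have hD : pvNdLoop n 0 = pvNdLoop (PySem.Int.floordiv n 10) 0 + 1 := by
    conv_lhs => rw [pvNdLoop]
    simp only [hn, dif_pos]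
    rw [pvNdLoop_shift (PySem.Int.floordiv n 10) (0 + 1)]
    ring
  have heq : n = 10 * (n / 10) + n % 10 := by omega
  rw [hA, hD, List.map_append, List.foldl_append]
  by_cases h2 : 0 < PySem.Int.floordiv n 10
  · rw [pvMain (PySem.Int.floordiv n 10) h2]
    have hnn : 0 ≤ pvNdLoop (PySem.Int.floordiv n 10) 0 := pvNdLoop_nonneg _ 0 le_rfl
    have ht : (pvNdLoop (PySem.Int.floordiv n 10) 0 + 1).toNat
        = (pvNdLoop (PySem.Int.floordiv n 10) 0).toNat + 1 := by omega
    rw [ht, pow_succ]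
    simp only [List.map_cons, List.map_nil, List.foldl_cons, List.foldl_nil]
    rw [hfd, hmd]
    ring_nf
    omega
  · have h0 : PySem.Int.floordiv n 10 = 0 := by rw [hfd] at h2 ⊢; omega
    have hlt : n < 10 := by rw [hfd] at h0; omega
    rw [h0]
    rw [show pvALoop (0 : Int) [] = [] from by rw [pvALoop]; simp]
    rw [show pvNdLoop (0 : Int) 0 = 0 from by rw [pvNdLoop]; simp]
    simp only [List.map_nil, List.foldl_nil, List.map_cons, List.foldl_cons]
    rw [hmd, show n % 10 = n from by omega]
    norm_num
termination_by n.toNat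
decreasing_by all_goals exact pvFloordiv10_toNat_lt n hn

-- ===== VERDICT (by name: the statement is the Claim_ definition above) =====
theorem dopuni_cifre_spec : Claim_equal_dopuni_cifre := by
  intro n _
  unfold Spec_dopuni_cifre dopuni_cifre dopuni_cifre_alt
  by_cases h0 : n = 0
  · subst h0
    simp only [if_true]
    rw [show pvALoop (0 : Int) [0] = [0] from by rw [pvALoop]; simp]
    norm_num
  · simp only [h0, if_false]
    by_cases hneg : n < 0
    · have hnp : ¬ 0 < n := by omega
      rw [show pvALoop n [] = [] from by rw [pvALoop]; simp [hnp]]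
      simp [hneg]
    · have hpos : 0 < n := by omega
      simp only [hneg, if_false]
      exact pvMain n hpos
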